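-- pv_equiv track=rewrite | github.com/nnmalex/1password-2-bitwarden | src/transform.py | transform_identity
-- ===== SOURCE A (Python) =====
-- from typing import Any, Optional, Dict, List, Tuple
--
-- def transform_identity(item: Dict, category: str) -> Dict:
--     """Transform to Bitwarden identity type."""
--     identity: Dict[str, Any] = {
--         'title': None,
--         'firstName': None,
--         'middleName': None,
--         'lastName': None,
--         'address1': None,
--         'address2': None,
--         'address3': None,
--         'city': None,
--         'state': None,
--         'postalCode': None,
--         'country': None,
--         'company': None,
--         'email': None,
--         'phone': None,
--         'ssn': None,
--         'username': None,
--         'passportNumber': None,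
--         'licenseNumber': None
--     }
--
--     fields = item.get('fields', [])
--     for field in fields:
--         field_id = field.get('id', '')
--         label = field.get('label', '').lower()
--         value = field.get('value')
--
--         if not value:
--             continue
--
--         # Map common identity fields
--         if 'firstname' in field_id or 'first' in label:
--             identity['firstName'] = value
--         elif 'lastname' in field_id or 'last' in label:
--             identity['lastName'] = value
--         elif 'email' in field_id or 'email' in label:
--             identity['email'] = value
--         elif 'phone' in field_id or 'phone' in label:
--             identity['phone'] = value
--         elif 'address' in field_id or 'street' in label:
--             if not identity['address1']:
--                 identity['address1'] = value
--             elif not identity['address2']: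
--                 identity['address2'] = value
--         elif 'city' in field_id or 'city' in label:
--             identity['city'] = value
--         elif 'state' in field_id or 'state' in label or 'province' in label:
--             identity['state'] = value
--         elif 'zip' in field_id or 'postal' in label:
--             identity['postalCode'] = value
--         elif 'country' in field_id or 'country' in label:
--             identity['country'] = value
--         elif 'company' in field_id or 'company' in label:
--             identity['company'] = value
--         elif 'ssn' in field_id or 'social' in label:
--             identity['ssn'] = value
--         elif 'passport' in label or category == 'PASSPORT':
--             if 'number' in label:
--                 identity['passportNumber'] = value
--         elif 'license' in label or category == 'DRIVER_LICENSE':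
--             if 'number' in label:
--                 identity['licenseNumber'] = value
--
--     return identity
-- ===== SOURCE B (Python) =====
-- _IDENTITY_KEYS = ('title', 'firstName', 'middleName', 'lastName', 'address1',
--                   'address2', 'address3', 'city', 'state', 'postalCode',
--                   'country', 'company', 'email', 'phone', 'ssn', 'username',
--                   'passportNumber', 'licenseNumber')
--
--
-- def _tag(field_id, label, category):
--     """Classify one field to an identity slot name ('ADDR' = street-address stream)."""
--     if 'firstname' in field_id or 'first' in label:
--         return 'firstName'
--     if 'lastname' in field_id or 'last' in label:
--         return 'lastName'
--     if 'email' in field_id or 'email' in label: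
--         return 'email'
--     if 'phone' in field_id or 'phone' in label:
--         return 'phone'
--     if 'address' in field_id or 'street' in label:
--         return 'ADDR'
--     if 'city' in field_id or 'city' in label:
--         return 'city'
--     if 'state' in field_id or 'state' in label or 'province' in label:
--         return 'state'
--     if 'zip' in field_id or 'postal' in label:
--         return 'postalCode'
--     if 'country' in field_id or 'country' in label:
--         return 'country'
--     if 'company' in field_id or 'company' in label:
--         return 'company'
--     if 'ssn' in field_id or 'social' in label:
--         return 'ssn'
--     if 'passport' in label or category == 'PASSPORT':
--         return 'passportNumber' if 'number' in label else None
--     if 'license' in label or category == 'DRIVER_LICENSE':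
--         return 'licenseNumber' if 'number' in label else None
--     return None
--
--
-- def transform_identity(item, category):
--     """Transform to Bitwarden identity type (classify fields, then assemble)."""
--     # stage 1: classify every non-empty field into a (slot, value) stream
--     tagged = []
--     for field in item.get('fields', []):
--         value = field.get('value')
--         if not value:
--             continue
--         t = _tag(field.get('id', ''), field.get('label', '').lower(), category)
--         if t is not None:
--             tagged.append((t, value))
--     # stage 2: the last value per slot wins; street addresses fill address1/address2 in order
--     addrs = [v for t, v in tagged if t == 'ADDR']
--     by_tag = dict(tagged)
--     identity = {k: by_tag.get(k) for k in _IDENTITY_KEYS}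
--     if addrs:
--         identity['address1'] = addrs[0]
--     if len(addrs) > 1:
--         identity['address2'] = addrs[1]
--     return identity
-- ===== Notes on version B (the rewrite author's own statement) =====
-- stated objective: alternative
-- what changed: A threads a mutable identity dict through one pass, assigning slots as it meets fields; B is staged: a stateless classifier maps each non-empty field to a slot tag, producing a (tag, value) stream, and the identity is then assembled by last-wins projection (dict(tagged)) per slot plus taking the first two values of the street-address sub-stream for address1/address2.
import Mathlib
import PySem

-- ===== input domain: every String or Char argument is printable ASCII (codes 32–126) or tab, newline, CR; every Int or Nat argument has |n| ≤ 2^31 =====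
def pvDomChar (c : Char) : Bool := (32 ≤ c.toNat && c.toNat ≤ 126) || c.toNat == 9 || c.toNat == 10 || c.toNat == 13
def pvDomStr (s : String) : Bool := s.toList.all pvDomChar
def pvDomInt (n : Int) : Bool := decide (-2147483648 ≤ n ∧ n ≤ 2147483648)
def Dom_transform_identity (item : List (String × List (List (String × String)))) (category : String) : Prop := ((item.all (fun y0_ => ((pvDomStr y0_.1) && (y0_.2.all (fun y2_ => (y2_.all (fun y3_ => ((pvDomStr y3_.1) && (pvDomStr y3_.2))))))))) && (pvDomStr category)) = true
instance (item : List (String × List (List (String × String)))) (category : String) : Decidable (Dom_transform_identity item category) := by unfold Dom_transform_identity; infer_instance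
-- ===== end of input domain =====

-- B replaces A's stateful single pass by two stages: a stateless classifier tags each
-- non-empty field with a slot name, then the identity is assembled by last-wins projection
-- per slot plus the first two street-address values; same output, no speed claim.

-- ===== PORT A =====

-- Python truthiness of an Optional[str]: falsy iff missing (None) or the empty string.
def pvFalsy (o : Option String) : Bool :=
  match o with
  | none => true
  | some s => s == ""

-- the literal `identity` dict A starts from, in its insertion order
def pvInitIdentity : PySem.Dict String (Option String) :=
  PySem.Dict.mk [("title", none), ("firstName", none), ("middleName", none), ("lastName", none),
    ("address1", none), ("address2", none), ("address3", none), ("city", none), ("state", none),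
    ("postalCode", none), ("country", none), ("company", none), ("email", none), ("phone", none),
    ("ssn", none), ("username", none), ("passportNumber", none), ("licenseNumber", none)]

-- A's elif chain on one non-empty field (fid/label/value already extracted)
def pvChainA (category : String) (identity : PySem.Dict String (Option String))
    (fid label v : String) : PySem.Dict String (Option String) :=
  if PySem.Str.isIn "firstname" fid || PySem.Str.isIn "first" label then
    identity.insert "firstName" (some v)
  else if PySem.Str.isIn "lastname" fid || PySem.Str.isIn "last" label then
    identity.insert "lastName" (some v)
  else if PySem.Str.isIn "email" fid || PySem.Str.isIn "email" label then
    identity.insert "email" (some v)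
  else if PySem.Str.isIn "phone" fid || PySem.Str.isIn "phone" label then
    identity.insert "phone" (some v)
  else if PySem.Str.isIn "address" fid || PySem.Str.isIn "street" label then
    (if pvFalsy (identity.getD "address1" none) then identity.insert "address1" (some v)
     else if pvFalsy (identity.getD "address2" none) then identity.insert "address2" (some v)
     else identity)
  else if PySem.Str.isIn "city" fid || PySem.Str.isIn "city" label then
    identity.insert "city" (some v)
  else if PySem.Str.isIn "state" fid || PySem.Str.isIn "state" label || PySem.Str.isIn "province" label then
    identity.insert "state" (some v)
  else if PySem.Str.isIn "zip" fid || PySem.Str.isIn "postal" label then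
    identity.insert "postalCode" (some v)
  else if PySem.Str.isIn "country" fid || PySem.Str.isIn "country" label then
    identity.insert "country" (some v)
  else if PySem.Str.isIn "company" fid || PySem.Str.isIn "company" label then
    identity.insert "company" (some v)
  else if PySem.Str.isIn "ssn" fid || PySem.Str.isIn "social" label then
    identity.insert "ssn" (some v)
  else if PySem.Str.isIn "passport" label || category == "PASSPORT" then
    (if PySem.Str.isIn "number" label then identity.insert "passportNumber" (some v) else identity)
  else if PySem.Str.isIn "license" label || category == "DRIVER_LICENSE" then
    (if PySem.Str.isIn "number" label then identity.insert "licenseNumber" (some v) else identity)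
  else identity

-- A's loop body: extract the locals, skip falsy values, run the chain
def pvStepA (category : String) (identity : PySem.Dict String (Option String))
    (field : List (String × String)) : PySem.Dict String (Option String) :=
  match (PySem.Dict.mk field).get? "value" with
  | none => identity
  | some v =>
    if v == "" then identity
    else pvChainA category identity ((PySem.Dict.mk field).getD "id" "")
      (PySem.Str.lower ((PySem.Dict.mk field).getD "label" "")) v

def transform_identity (item : List (String × List (List (String × String)))) (category : String) : List (String × Option String) :=
  (((PySem.Dict.mk item).getD "fields" []).foldl (pvStepA category) pvInitIdentity).items

-- ===== PORT B =====

-- _IDENTITY_KEYS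
def pvIdentityKeys : List String :=
  ["title", "firstName", "middleName", "lastName", "address1", "address2", "address3",
   "city", "state", "postalCode", "country", "company", "email", "phone", "ssn",
   "username", "passportNumber", "licenseNumber"]

-- _tag: classify one field to a slot name ('ADDR' = street-address stream), stateless
def pvTag (fid label category : String) : Option String :=
  if PySem.Str.isIn "firstname" fid || PySem.Str.isIn "first" label then some "firstName"
  else if PySem.Str.isIn "lastname" fid || PySem.Str.isIn "last" label then some "lastName"
  else if PySem.Str.isIn "email" fid || PySem.Str.isIn "email" label then some "email"
  else if PySem.Str.isIn "phone" fid || PySem.Str.isIn "phone" label then some "phone"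
  else if PySem.Str.isIn "address" fid || PySem.Str.isIn "street" label then some "ADDR"
  else if PySem.Str.isIn "city" fid || PySem.Str.isIn "city" label then some "city"
  else if PySem.Str.isIn "state" fid || PySem.Str.isIn "state" label || PySem.Str.isIn "province" label then some "state"
  else if PySem.Str.isIn "zip" fid || PySem.Str.isIn "postal" label then some "postalCode"
  else if PySem.Str.isIn "country" fid || PySem.Str.isIn "country" label then some "country"
  else if PySem.Str.isIn "company" fid || PySem.Str.isIn "company" label then some "company"
  else if PySem.Str.isIn "ssn" fid || PySem.Str.isIn "social" label then some "ssn"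
  else if PySem.Str.isIn "passport" label || category == "PASSPORT" then
    (if PySem.Str.isIn "number" label then some "passportNumber" else none)
  else if PySem.Str.isIn "license" label || category == "DRIVER_LICENSE" then
    (if PySem.Str.isIn "number" label then some "licenseNumber" else none)
  else none

-- stage-1 contribution of one field: its (tag, value) pair, if any
def pvClassify (category fid label : String) (value : Option String) : List (String × String) :=
  match value with
  | none => []
  | some v =>
    if v == "" then []
    else
      match pvTag fid label category with
      | some t => [(t, v)]
      | none => []

-- stage-1 loop body: append the classification of one field
def pvCollect (category : String) (tagged : List (String × String))
    (field : List (String × String)) : List (String × String) :=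
  tagged ++ pvClassify category ((PySem.Dict.mk field).getD "id" "")
    (PySem.Str.lower ((PySem.Dict.mk field).getD "label" "")) ((PySem.Dict.mk field).get? "value")

-- addrs = [v for t, v in tagged if t == 'ADDR']
def pvAddrs (tagged : List (String × String)) : List String :=
  (tagged.filter (fun p => p.1 == "ADDR")).map Prod.snd

-- by_tag = dict(tagged)  (last value per key wins)
def pvByTag (tagged : List (String × String)) : PySem.Dict String String :=
  tagged.foldl (fun d p => d.insert p.1 p.2) PySem.Dict.empty

-- stage 2: assemble the identity from the tagged stream
def pvAssemble (tagged : List (String × String)) : List (String × Option String) :=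
  let identity := PySem.Dict.mk (pvIdentityKeys.map (fun k => (k, (pvByTag tagged).get? k)))
  let identity := match pvAddrs tagged with
    | [] => identity
    | a0 :: _ => identity.insert "address1" (some a0)
  let identity := match pvAddrs tagged with
    | _ :: a1 :: _ => identity.insert "address2" (some a1)
    | _ => identity
  identity.items

def transform_identity_alt (item : List (String × List (List (String × String)))) (category : String) : List (String × Option String) :=
  pvAssemble (((PySem.Dict.mk item).getD "fields" []).foldl (pvCollect category) [])

-- ===== PRECONDITION & SPEC =====
def Spec_transform_identity (item : List (String × List (List (String × String)))) (category : String) (out : List (String × Option String)) : Prop := out = transform_identity_alt item category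
instance (item : List (String × List (List (String × String)))) (category : String) (out : List (String × Option String)) : Decidable (Spec_transform_identity item category out) := by unfold Spec_transform_identity; infer_instance

-- ===== CLAIM (what is proved, stated in full; the proofs are below) =====
def Claim_equal_transform_identity : Prop := ∀ (item : List (String × List (List (String × String)))) (category : String), Dom_transform_identity item category → Spec_transform_identity item category (transform_identity item category)

-- ===== LEMMAS AND PROOFS =====

-- the slot names pvTag can produce
def pvTags : List String :=
  ["firstName", "lastName", "email", "phone", "ADDR", "city", "state", "postalCode",
   "country", "company", "ssn", "passportNumber", "licenseNumber"]

-- one step of A's fold, expressed on a (tag, value) pair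
def pvStep' (d : PySem.Dict String (Option String)) (p : String × String) : PySem.Dict String (Option String) :=
  if p.1 == "ADDR" then
    (if pvFalsy (d.getD "address1" none) then d.insert "address1" (some p.2)
     else if pvFalsy (d.getD "address2" none) then d.insert "address2" (some p.2)
     else d)
  else d.insert p.1 (some p.2)

-- functional mirror of the identity dict: one value per key
def pvUpd (f : String → Option String) (t : String) (x : Option String) : String → Option String :=
  fun k => if k = t then x else f k

def pvStepF (f : String → Option String) (p : String × String) : String → Option String :=
  if p.1 == "ADDR" then
    (if pvFalsy (f "address1") then pvUpd f "address1" (some p.2)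
     else if pvFalsy (f "address2") then pvUpd f "address2" (some p.2)
     else f)
  else pvUpd f p.1 (some p.2)

def pvCanon (f : String → Option String) : PySem.Dict String (Option String) :=
  PySem.Dict.mk (pvIdentityKeys.map (fun k => (k, f k)))

-- B's per-slot answer on a tagged stream
def pvG (ts : List (String × String)) (k : String) : Option String :=
  if k = "address1" then (pvAddrs ts)[0]?
  else if k = "address2" then (pvAddrs ts)[1]?
  else (pvByTag ts).get? k

theorem pvTag_mem (fid label category t : String) (H : pvTag fid label category = some t) :
    t ∈ pvTags := by
  unfold pvTag at H
  generalize (PySem.Str.isIn "firstname" fid || PySem.Str.isIn "first" label) = b1 at H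
  generalize (PySem.Str.isIn "lastname" fid || PySem.Str.isIn "last" label) = b2 at H
  generalize (PySem.Str.isIn "email" fid || PySem.Str.isIn "email" label) = b3 at H
  generalize (PySem.Str.isIn "phone" fid || PySem.Str.isIn "phone" label) = b4 at H
  generalize (PySem.Str.isIn "address" fid || PySem.Str.isIn "street" label) = b5 at H
  generalize (PySem.Str.isIn "city" fid || PySem.Str.isIn "city" label) = b6 at H
  generalize (PySem.Str.isIn "state" fid || PySem.Str.isIn "state" label || PySem.Str.isIn "province" label) = b7 at H
  generalize (PySem.Str.isIn "zip" fid || PySem.Str.isIn "postal" label) = b8 at H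
  generalize (PySem.Str.isIn "country" fid || PySem.Str.isIn "country" label) = b9 at H
  generalize (PySem.Str.isIn "company" fid || PySem.Str.isIn "company" label) = b10 at H
  generalize (PySem.Str.isIn "ssn" fid || PySem.Str.isIn "social" label) = b11 at H
  generalize (PySem.Str.isIn "passport" label || category == "PASSPORT") = b12 at H
  generalize (PySem.Str.isIn "number" label) = b13 at H
  generalize (PySem.Str.isIn "license" label || category == "DRIVER_LICENSE") = b14 at H
  cases b1 with
  | true => simp only [if_true] at H; obtain rfl := Option.some.inj H; decide
  | false =>
    simp only [Bool.false_eq_true, if_false] at H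
    cases b2 with
    | true => simp only [if_true] at H; obtain rfl := Option.some.inj H; decide
    | false =>
      simp only [Bool.false_eq_true, if_false] at H
      cases b3 with
      | true => simp only [if_true] at H; obtain rfl := Option.some.inj H; decide
      | false =>
        simp only [Bool.false_eq_true, if_false] at H
        cases b4 with
        | true => simp only [if_true] at H; obtain rfl := Option.some.inj H; decide
        | false =>
          simp only [Bool.false_eq_true, if_false] at H
          cases b5 with
          | true => simp only [if_true] at H; obtain rfl := Option.some.inj H; decide
          | false =>
            simp only [Bool.false_eq_true, if_false] at H
            cases b6 with
            | true => simp only [if_true] at H; obtain rfl := Option.some.inj H; decide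
            | false =>
              simp only [Bool.false_eq_true, if_false] at H
              cases b7 with
              | true => simp only [if_true] at H; obtain rfl := Option.some.inj H; decide
              | false =>
                simp only [Bool.false_eq_true, if_false] at H
                cases b8 with
                | true => simp only [if_true] at H; obtain rfl := Option.some.inj H; decide
                | false =>
                  simp only [Bool.false_eq_true, if_false] at H
                  cases b9 with
                  | true => simp only [if_true] at H; obtain rfl := Option.some.inj H; decide
                  | false =>
                    simp only [Bool.false_eq_true, if_false] at H
                    cases b10 with
                    | true => simp only [if_true] at H; obtain rfl := Option.some.inj H; decide
                    | false =>
                      simp only [Bool.false_eq_true, if_false] at H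
                      cases b11 with
                      | true => simp only [if_true] at H; obtain rfl := Option.some.inj H; decide
                      | false =>
                        simp only [Bool.false_eq_true, if_false] at H
                        cases b12 with
                        | true =>
                          simp only [if_true] at H
                          cases b13 with
                          | true => simp only [if_true] at H; obtain rfl := Option.some.inj H; decide
                          | false => simp only [Bool.false_eq_true, if_false] at H; injection H
                        | false =>
                          simp only [Bool.false_eq_true, if_false] at H
                          cases b14 with
                          | true =>
                            simp only [if_true] at H
                            cases b13 with
                            | true => simp only [if_true] at H; obtain rfl := Option.some.inj H; decide
                            | false => simp only [Bool.false_eq_true, if_false] at H; injection H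
                          | false => simp only [Bool.false_eq_true, if_false] at H; injection H

theorem pvChain_eq (category fid label v : String) (d : PySem.Dict String (Option String)) :
    pvChainA category d fid label v =
      List.foldl pvStep' d
        (match pvTag fid label category with
         | some t => [(t, v)]
         | none => []) := by
  unfold pvChainA pvTag
  generalize (PySem.Str.isIn "firstname" fid || PySem.Str.isIn "first" label) = b1
  generalize (PySem.Str.isIn "lastname" fid || PySem.Str.isIn "last" label) = b2
  generalize (PySem.Str.isIn "email" fid || PySem.Str.isIn "email" label) = b3
  generalize (PySem.Str.isIn "phone" fid || PySem.Str.isIn "phone" label) = b4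
  generalize (PySem.Str.isIn "address" fid || PySem.Str.isIn "street" label) = b5
  generalize (PySem.Str.isIn "city" fid || PySem.Str.isIn "city" label) = b6
  generalize (PySem.Str.isIn "state" fid || PySem.Str.isIn "state" label || PySem.Str.isIn "province" label) = b7
  generalize (PySem.Str.isIn "zip" fid || PySem.Str.isIn "postal" label) = b8
  generalize (PySem.Str.isIn "country" fid || PySem.Str.isIn "country" label) = b9
  generalize (PySem.Str.isIn "company" fid || PySem.Str.isIn "company" label) = b10
  generalize (PySem.Str.isIn "ssn" fid || PySem.Str.isIn "social" label) = b11
  generalize (PySem.Str.isIn "passport" label || category == "PASSPORT") = b12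
  generalize (PySem.Str.isIn "number" label) = b13
  generalize (PySem.Str.isIn "license" label || category == "DRIVER_LICENSE") = b14
  cases b1 with
  | true => simp only [if_true]; simp [pvStep']
  | false =>
    simp only [Bool.false_eq_true, if_false]
    cases b2 with
    | true => simp only [if_true]; simp [pvStep']
    | false =>
      simp only [Bool.false_eq_true, if_false]
      cases b3 with
      | true => simp only [if_true]; simp [pvStep']
      | false =>
        simp only [Bool.false_eq_true, if_false]
        cases b4 with
        | true => simp only [if_true]; simp [pvStep']
        | false =>
          simp only [Bool.false_eq_true, if_false]
          cases b5 with
          | true => simp only [if_true]; simp [pvStep']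
          | false =>
            simp only [Bool.false_eq_true, if_false]
            cases b6 with
            | true => simp only [if_true]; simp [pvStep']
            | false =>
              simp only [Bool.false_eq_true, if_false]
              cases b7 with
              | true => simp only [if_true]; simp [pvStep']
              | false =>
                simp only [Bool.false_eq_true, if_false]
                cases b8 with
                | true => simp only [if_true]; simp [pvStep']
                | false =>
                  simp only [Bool.false_eq_true, if_false]
                  cases b9 with
                  | true => simp only [if_true]; simp [pvStep']
                  | false =>
                    simp only [Bool.false_eq_true, if_false]
                    cases b10 with
                    | true => simp only [if_true]; simp [pvStep']
                    | false =>
                      simp only [Bool.false_eq_true, if_false]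
                      cases b11 with
                      | true => simp only [if_true]; simp [pvStep']
                      | false =>
                        simp only [Bool.false_eq_true, if_false]
                        cases b12 with
                        | true =>
                          simp only [if_true]
                          cases b13 with
                          | true => simp only [if_true]; simp [pvStep']
                          | false => simp only [Bool.false_eq_true, if_false]; rfl
                        | false =>
                          simp only [Bool.false_eq_true, if_false]
                          cases b14 with
                          | true =>
                            simp only [if_true]
                            cases b13 with
                            | true => simp only [if_true]; simp [pvStep']
                            | false => simp only [Bool.false_eq_true, if_false]; rfl
                          | false => simp only [Bool.false_eq_true, if_false]; rfl

theorem pvStepA_eq (category : String) (d : PySem.Dict String (Option String))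
    (field : List (String × String)) :
    pvStepA category d field = (pvCollect category [] field).foldl pvStep' d := by
  unfold pvStepA pvCollect pvClassify
  cases (PySem.Dict.mk field).get? "value" with
  | none => rfl
  | some v =>
    show (if (v == "") = true then d
          else pvChainA category d ((PySem.Dict.mk field).getD "id" "")
            (PySem.Str.lower ((PySem.Dict.mk field).getD "label" "")) v)
        = List.foldl pvStep' d ([] ++
            (if (v == "") = true then ([] : List (String × String))
             else match pvTag ((PySem.Dict.mk field).getD "id" "")
                (PySem.Str.lower ((PySem.Dict.mk field).getD "label" "")) category with
              | some t => [(t, v)]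
              | none => []))
    rw [List.nil_append]
    by_cases hve : (v == "") = true
    · rw [if_pos hve, if_pos hve]; rfl
    · rw [if_neg hve, if_neg hve]
      exact pvChain_eq category _ _ v d

theorem pvClassify_mem (category fid label : String) (o : Option String)
    (p : String × String) (hp : p ∈ pvClassify category fid label o) :
    p.1 ∈ pvTags ∧ p.2 ≠ "" := by
  cases o with
  | none => simp [pvClassify] at hp
  | some v =>
    simp only [pvClassify] at hp
    by_cases hve : (v == "") = true
    · rw [if_pos hve] at hp; simp at hp
    · rw [if_neg hve] at hp
      cases ht : pvTag fid label category with
      | none => rw [ht] at hp; simp at hp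
      | some t =>
        rw [ht] at hp
        simp at hp
        subst hp
        exact ⟨pvTag_mem fid label category t ht, by simpa using hve⟩

theorem pvCollect_mem (category : String) (field : List (String × String))
    (p : String × String) (hp : p ∈ pvCollect category [] field) :
    p.1 ∈ pvTags ∧ p.2 ≠ "" := by
  unfold pvCollect at hp
  rw [List.nil_append] at hp
  exact pvClassify_mem _ _ _ _ p hp

theorem foldl_pvCollect (category : String) (fields : List (List (String × String)))
    (acc : List (String × String)) :
    fields.foldl (pvCollect category) acc = acc ++ fields.flatMap (pvCollect category []) := by
  induction fields generalizing acc with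
  | nil => simp
  | cons f fs ih =>
    rw [List.foldl_cons, ih, List.flatMap_cons]
    unfold pvCollect
    rw [List.nil_append, List.append_assoc]

theorem foldl_pvStepA (category : String) (fields : List (List (String × String)))
    (d : PySem.Dict String (Option String)) :
    fields.foldl (pvStepA category) d = (fields.flatMap (pvCollect category [])).foldl pvStep' d := by
  induction fields generalizing d with
  | nil => rfl
  | cons f fs ih =>
    rw [List.foldl_cons, ih, List.flatMap_cons, List.foldl_append, pvStepA_eq]

theorem pvInit_eq_canon : pvInitIdentity = pvCanon (fun _ => none) := rfl

theorem get?_mk_map (keys : List String) (f : String → Option String) (k : String)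
    (hk : k ∈ keys) :
    (PySem.Dict.mk (keys.map (fun x => (x, f x)))).get? k = some (f k) := by
  induction keys with
  | nil => cases hk
  | cons a as ih =>
    rw [List.map_cons, PySem.Dict.get?_mk_cons]
    by_cases hak : a = k
    · subst hak; simp
    · rw [if_neg (by simpa using hak)]
      exact ih (by cases hk with
        | head => exact absurd rfl hak
        | tail _ h => exact h)

theorem pvCanon_getD (f : String → Option String) (k : String) (hk : k ∈ pvIdentityKeys) :
    (pvCanon f).getD k none = f k := by
  rw [pvCanon, PySem.Dict.getD_eq_get?_getD, get?_mk_map _ _ _ hk]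
  rfl

theorem pvCanon_insert (f : String → Option String) (t : String) (x : Option String)
    (ht : t ∈ pvIdentityKeys) :
    (pvCanon f).insert t x = pvCanon (pvUpd f t x) := by
  apply PySem.Dict.ext
  have hc : (pvCanon f).contains t = true := by
    rw [PySem.Dict.contains_iff_mem_keys, pvCanon, PySem.Dict.keys_mk, List.map_map]
    simpa using ht
  rw [PySem.Dict.items_insert_of_contains _ _ hc]
  show (pvIdentityKeys.map (fun k => (k, f k))).map _ = pvIdentityKeys.map (fun k => (k, pvUpd f t x k))
  rw [List.map_map]
  refine List.map_congr_left (fun k _ => ?_)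
  by_cases hkt : k = t
  · subst hkt; simp [pvUpd]
  · simp [pvUpd, hkt, Function.comp]

theorem pvStep'_canon (f : String → Option String) (p : String × String)
    (hp : p.1 ∈ pvTags) :
    pvStep' (pvCanon f) p = pvCanon (pvStepF f p) := by
  obtain ⟨t, v⟩ := p
  by_cases hA : t = "ADDR"
  · subst hA
    unfold pvStep' pvStepF
    dsimp only
    have hADDR : (("ADDR" : String) == "ADDR") = true := by decide
    rw [if_pos hADDR, if_pos hADDR,
      pvCanon_getD _ _ (by decide), pvCanon_getD _ _ (by decide)]
    split_ifs with h1 h2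
    · exact pvCanon_insert _ _ _ (by decide)
    · exact pvCanon_insert _ _ _ (by decide)
    · rfl
  · have hkeys : t ∈ pvIdentityKeys := by
      have hall : ∀ x ∈ pvTags, x = "ADDR" ∨ x ∈ pvIdentityKeys := by decide
      rcases hall t hp with h | h
      · exact absurd h hA
      · exact h
    unfold pvStep' pvStepF
    dsimp only
    rw [if_neg (by simp [hA]), if_neg (by simp [hA])]
    exact pvCanon_insert _ _ _ hkeys

theorem foldl_pvStep'_canon (ts : List (String × String)) (f : String → Option String)
    (h : ∀ p ∈ ts, p.1 ∈ pvTags) :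
    ts.foldl pvStep' (pvCanon f) = pvCanon (ts.foldl pvStepF f) := by
  induction ts generalizing f with
  | nil => rfl
  | cons p ps ih =>
    rw [List.foldl_cons, List.foldl_cons, pvStep'_canon f p (h p List.mem_cons_self)]
    exact ih _ (fun q hq => h q (List.mem_cons_of_mem p hq))

theorem get?_foldl_insert_of_ne (ts : List (String × String))
    (d : PySem.Dict String String) (k : String) (h : ∀ p ∈ ts, p.1 ≠ k) :
    (ts.foldl (fun d p => d.insert p.1 p.2) d).get? k = d.get? k := by
  induction ts generalizing d with
  | nil => rfl
  | cons p ps ih =>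
    rw [List.foldl_cons, ih _ (fun q hq => h q (List.mem_cons_of_mem p hq))]
    exact PySem.Dict.get?_insert_of_ne _ _ (Ne.symm (h p List.mem_cons_self))

theorem pvByTag_get?_not_mem (ts : List (String × String)) (k : String)
    (h : ∀ p ∈ ts, p.1 ≠ k) : (pvByTag ts).get? k = none := by
  rw [pvByTag, get?_foldl_insert_of_ne ts _ k h]
  simp

theorem pvAddrs_append (ts : List (String × String)) (p : String × String) :
    pvAddrs (ts ++ [p]) = pvAddrs ts ++ (if p.1 == "ADDR" then [p.2] else []) := by
  rw [pvAddrs, List.filter_append]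
  by_cases hA : (p.1 == "ADDR") = true
  · simp [pvAddrs, hA]
  · simp at hA; simp [pvAddrs, hA]

theorem pvByTag_append (ts : List (String × String)) (p : String × String) :
    pvByTag (ts ++ [p]) = (pvByTag ts).insert p.1 p.2 := by
  rw [pvByTag, List.foldl_append]
  rfl

theorem pvAddrs_ne_empty (ts : List (String × String))
    (h : ∀ p ∈ ts, p.2 ≠ "") : ∀ x ∈ pvAddrs ts, x ≠ "" := by
  intro x hx
  rw [pvAddrs] at hx
  obtain ⟨q, hq, rfl⟩ := List.mem_map.mp hx
  exact h q (List.mem_filter.mp hq).1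

theorem pvStepF_eq_pvG (ts : List (String × String))
    (h : ∀ p ∈ ts, p.1 ∈ pvTags ∧ p.2 ≠ "") :
    ∀ k, k ≠ "ADDR" → ts.foldl pvStepF (fun _ => none) k = pvG ts k := by
  induction ts using List.reverseRecOn with
  | nil => intro k hk; simp [pvG, pvAddrs, pvByTag, PySem.Dict.get?_empty]
  | append_singleton ts p ih =>
    have hts : ∀ q ∈ ts, q.1 ∈ pvTags ∧ q.2 ≠ "" :=
      fun q hq => h q (List.mem_append_left _ hq)
    have hp : p.1 ∈ pvTags ∧ p.2 ≠ "" := h p (List.mem_append_right _ List.mem_cons_self)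
    have IH := ih hts
    intro k hk
    rw [List.foldl_append, List.foldl_cons, List.foldl_nil]
    obtain ⟨t, v⟩ := p
    by_cases hA : t = "ADDR"
    · subst hA
      rw [pvStepF, if_pos (by simp),
        IH "address1" (by decide), IH "address2" (by decide)]
      have hG1 : pvG ts "address1" = (pvAddrs ts)[0]? := by rw [pvG]; simp
      have hG2 : pvG ts "address2" = (pvAddrs ts)[1]? := by rw [pvG]; simp
      have haddr : pvAddrs (ts ++ [("ADDR", v)]) = pvAddrs ts ++ [v] := by
        rw [pvAddrs_append]; simp
      have hbt : pvByTag (ts ++ [("ADDR", v)]) = (pvByTag ts).insert "ADDR" v :=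
        pvByTag_append ts _
      rcases has : pvAddrs ts with _ | ⟨a, rest⟩
      · rw [hG1, has, if_pos (by simp [pvFalsy])]
        rw [pvG, pvUpd]
        by_cases hk1 : k = "address1"
        · rw [if_pos hk1, if_pos hk1, haddr, has]; rfl
        · rw [if_neg hk1, if_neg hk1]
          by_cases hk2 : k = "address2"
          · rw [if_pos hk2, haddr, has, IH k hk, pvG, if_neg hk1, if_pos hk2, has]
            rfl
          · rw [if_neg hk2, IH k hk, pvG, if_neg hk1, if_neg hk2, hbt,
              PySem.Dict.get?_insert_of_ne _ _ hk]
      · have hane : a ≠ "" := pvAddrs_ne_empty ts (fun q hq => (hts q hq).2) a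
          (by rw [has]; exact List.mem_cons_self)
        rw [hG1, has, if_neg (by simp [pvFalsy, hane])]
        rcases rest with _ | ⟨b, rest'⟩
        · rw [hG2, has, if_pos (by simp [pvFalsy])]
          rw [pvG, pvUpd]
          by_cases hk2 : k = "address2"
          · have hk1 : k ≠ "address1" := by rw [hk2]; decide
            rw [if_pos hk2, if_neg hk1, if_pos hk2, haddr, has]; rfl
          · rw [if_neg hk2]
            by_cases hk1 : k = "address1"
            · rw [if_pos hk1, IH k hk, pvG, if_pos hk1, haddr, has]; rfl
            · rw [if_neg hk1, if_neg hk2, IH k hk, pvG, if_neg hk1, if_neg hk2, hbt,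
                PySem.Dict.get?_insert_of_ne _ _ hk]
        · have hbne : b ≠ "" := pvAddrs_ne_empty ts (fun q hq => (hts q hq).2) b
            (by rw [has]; exact List.mem_cons_of_mem a List.mem_cons_self)
          rw [hG2, has, if_neg (by simp [pvFalsy, hbne])]
          rw [IH k hk, pvG, pvG]
          by_cases hk1 : k = "address1"
          · rw [if_pos hk1, if_pos hk1, haddr, has]; rfl
          · rw [if_neg hk1, if_neg hk1]
            by_cases hk2 : k = "address2"
            · rw [if_pos hk2, if_pos hk2, haddr, has]; rfl
            · rw [if_neg hk2, if_neg hk2, hbt,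
                PySem.Dict.get?_insert_of_ne _ _ hk]
    · have hne12 : t ≠ "address1" ∧ t ≠ "address2" := by
        have hall : ∀ x ∈ pvTags, x = "ADDR" ∨ (x ≠ "address1" ∧ x ≠ "address2") := by decide
        rcases hall t hp.1 with hx | hx
        · exact absurd hx hA
        · exact hx
      rw [pvStepF, if_neg (by simp [hA]), pvUpd]
      have haddr : pvAddrs (ts ++ [(t, v)]) = pvAddrs ts := by
        rw [pvAddrs_append, if_neg (by simp [hA]), List.append_nil]
      have hbt : pvByTag (ts ++ [(t, v)]) = (pvByTag ts).insert t v := pvByTag_append ts _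
      by_cases hkt : k = t
      · subst hkt
        rw [if_pos rfl, pvG, if_neg hne12.1, if_neg hne12.2, hbt,
          PySem.Dict.get?_insert_self]
      · rw [if_neg hkt, IH k hk, pvG, pvG, haddr, hbt,
          PySem.Dict.get?_insert_of_ne _ _ hkt]

theorem pvAssemble_eq_canon (ts : List (String × String))
    (h : ∀ p ∈ ts, p.1 ∈ pvTags) :
    pvAssemble ts = (pvCanon (pvG ts)).items := by
  have h1 : (pvByTag ts).get? "address1" = none :=
    pvByTag_get?_not_mem ts _ (fun p hp => by
      have hall : ∀ x ∈ pvTags, x ≠ "address1" := by decide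
      exact hall p.1 (h p hp))
  have h2 : (pvByTag ts).get? "address2" = none :=
    pvByTag_get?_not_mem ts _ (fun p hp => by
      have hall : ∀ x ∈ pvTags, x ≠ "address2" := by decide
      exact hall p.1 (h p hp))
  rw [pvAssemble]
  rcases has : pvAddrs ts with _ | ⟨a0, rest⟩
  · refine congrArg PySem.Dict.items ?_
    show pvCanon (fun k => (pvByTag ts).get? k) = pvCanon (pvG ts)
    rw [pvCanon, pvCanon]
    refine congrArg PySem.Dict.mk (List.map_congr_left (fun k _ => ?_))
    rw [pvG]
    by_cases hk1 : k = "address1"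
    · rw [if_pos hk1, has, hk1, h1]; rfl
    · rw [if_neg hk1]
      by_cases hk2 : k = "address2"
      · rw [if_pos hk2, has, hk2, h2]; rfl
      · rw [if_neg hk2]
  · rcases rest with _ | ⟨a1, rest'⟩
    · refine congrArg PySem.Dict.items ?_
      show (pvCanon (fun k => (pvByTag ts).get? k)).insert "address1" (some a0) = pvCanon (pvG ts)
      rw [pvCanon_insert _ _ _ (by decide), pvCanon, pvCanon]
      refine congrArg PySem.Dict.mk (List.map_congr_left (fun k _ => ?_))
      rw [pvUpd, pvG]
      by_cases hk1 : k = "address1"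
      · rw [if_pos hk1, if_pos hk1, has]; rfl
      · rw [if_neg hk1, if_neg hk1]
        by_cases hk2 : k = "address2"
        · rw [if_pos hk2, has, hk2, h2]; rfl
        · rw [if_neg hk2]
    · refine congrArg PySem.Dict.items ?_
      show ((pvCanon (fun k => (pvByTag ts).get? k)).insert "address1" (some a0)).insert "address2" (some a1) = pvCanon (pvG ts)
      rw [pvCanon_insert _ _ _ (by decide), pvCanon_insert _ _ _ (by decide), pvCanon, pvCanon]
      refine congrArg PySem.Dict.mk (List.map_congr_left (fun k _ => ?_))
      rw [pvUpd, pvUpd, pvG]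
      by_cases hk2 : k = "address2"
      · subst hk2
        rw [if_pos rfl, if_neg (by decide), if_pos rfl, has]
        simp
      · rw [if_neg hk2, if_neg hk2]
        by_cases hk1 : k = "address1"
        · rw [if_pos hk1, if_pos hk1, has]
          simp
        · rw [if_neg hk1, if_neg hk1]

-- ===== VERDICT (by name: the statement is the Claim_ definition above) =====
theorem transform_identity_spec : Claim_equal_transform_identity := by
  intro item category _
  unfold Spec_transform_identity transform_identity transform_identity_alt
  set fields := (PySem.Dict.mk item).getD "fields" [] with hf
  set ts := fields.flatMap (pvCollect category []) with hts
  have hmem : ∀ p ∈ ts, p.1 ∈ pvTags ∧ p.2 ≠ "" := by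
    intro p hp
    rw [hts, List.mem_flatMap] at hp
    obtain ⟨field, _, hpf⟩ := hp
    exact pvCollect_mem category field p hpf
  rw [foldl_pvStepA, pvInit_eq_canon, foldl_pvStep'_canon _ _ (fun p hp => (hmem p hp).1),
    foldl_pvCollect, List.nil_append, pvAssemble_eq_canon _ (fun p hp => (hmem p hp).1)]
  refine congrArg PySem.Dict.items ?_
  rw [pvCanon, pvCanon]
  refine congrArg PySem.Dict.mk (List.map_congr_left (fun k hk => ?_))
  have hall : ∀ x ∈ pvIdentityKeys, x ≠ "ADDR" := by decide
  rw [pvStepF_eq_pvG ts hmem k (hall k hk)]
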